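-- pv_equiv track=rewrite | github.com/Mesiance/puppet-trace | out.py | _increaseMultiplier
-- ===== SOURCE A (Python) =====
-- def _increaseMultiplier(treeDepthDict) -> int:
--     spaceMiltiplier = 0
--     prevDepth = 1
--     isFirst = True
--     for count in treeDepthDict.values():
--         if (isFirst and count == 0) or (count == 0 and prevDepth == 0):
--             prevDepth = count
--             spaceMiltiplier += 1
--         elif count == 1 and prevDepth == 0:
--             break
--         else:
--             pass
--         isFirst = False
--     return spaceMiltiplier
-- ===== SOURCE B (Python) =====
-- def _increaseMultiplier(treeDepthDict) -> int:
--     values = list(treeDepthDict.values())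
--     if not values or values[0] != 0:
--         return 0
--     cut = values.index(1) if 1 in values else len(values)
--     return values[:cut].count(0)
-- ===== Notes on version B (the rewrite author's own statement) =====
-- stated objective: simpler
-- what changed: Replaces A's one-pass isFirst/prevDepth state machine with staged library passes: locate the first 1 with values.index, slice the list there, and count zeros in the slice.
import Mathlib
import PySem

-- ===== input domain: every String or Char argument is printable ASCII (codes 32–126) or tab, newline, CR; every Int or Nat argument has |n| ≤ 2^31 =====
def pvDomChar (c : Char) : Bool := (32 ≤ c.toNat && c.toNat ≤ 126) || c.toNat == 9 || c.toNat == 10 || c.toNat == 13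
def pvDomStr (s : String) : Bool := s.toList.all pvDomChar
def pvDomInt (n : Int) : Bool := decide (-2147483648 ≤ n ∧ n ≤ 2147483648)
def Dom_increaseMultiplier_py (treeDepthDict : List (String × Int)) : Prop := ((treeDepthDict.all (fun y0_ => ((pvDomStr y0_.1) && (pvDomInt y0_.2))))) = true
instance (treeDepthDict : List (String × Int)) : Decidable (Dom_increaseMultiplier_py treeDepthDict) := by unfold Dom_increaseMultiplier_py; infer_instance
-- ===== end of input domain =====

-- B replaces A's isFirst/prevDepth state machine with staged passes: index of the first 1, slice there, count zeros in the slice (objective: simpler).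


-- ===== PORT A =====
-- loop of A: explicit recursion over values with state (spaceMiltiplier, prevDepth, isFirst); a `break` returns the accumulator
def increaseMultiplier_py_loop : List Int → Int → Int → Bool → Int
  | [], m, _, _ => m
  | c :: rest, m, prev, first =>
      if (first && c == 0) || (c == 0 && prev == 0) then
        increaseMultiplier_py_loop rest (m + 1) c false
      else if c == 1 && prev == 0 then m
      else increaseMultiplier_py_loop rest m prev false

def increaseMultiplier_py (treeDepthDict : List (String × Int)) : Int :=
  increaseMultiplier_py_loop (treeDepthDict.map Prod.snd) 0 1 true

-- ===== PORT B =====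
def increaseMultiplier_py_alt (treeDepthDict : List (String × Int)) : Int :=
  let values := treeDepthDict.map Prod.snd
  match values with
  | [] => 0
  | v :: _ =>
    if v != 0 then 0
    else
      -- cut = values.index(1) if 1 in values else len(values)
      let cut : Nat := (PySem.List.index? values 1).getD values.length
      -- values[:cut].count(0)
      Int.ofNat (PySem.List.count (PySem.List.slice values none (some (cut : Int))) 0)

-- ===== PRECONDITION & SPEC =====
def Spec_increaseMultiplier_py (treeDepthDict : List (String × Int)) (out : Int) : Prop := out = increaseMultiplier_py_alt treeDepthDict
instance (treeDepthDict : List (String × Int)) (out : Int) : Decidable (Spec_increaseMultiplier_py treeDepthDict out) := by unfold Spec_increaseMultiplier_py; infer_instance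

-- ===== CLAIM =====
def Claim_equal_increaseMultiplier_py : Prop := ∀ (treeDepthDict : List (String × Int)), Dom_increaseMultiplier_py treeDepthDict → Spec_increaseMultiplier_py treeDepthDict (increaseMultiplier_py treeDepthDict)

-- ===== LEMMAS AND PROOFS =====
-- after the first zero the loop runs with prev = 0, isFirst = false: it counts zeros until the first 1
theorem loop_zero (l : List Int) (m : Int) :
    increaseMultiplier_py_loop l m 0 false
      = m + Int.ofNat ((l.takeWhile (fun x => x != 1)).countP (fun c => c == 0)) := by
  induction l generalizing m with
  | nil => simp [increaseMultiplier_py_loop]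
  | cons c rest ih =>
    by_cases hc : c = 0
    · subst hc
      simp [increaseMultiplier_py_loop, List.takeWhile, ih]
      omega
    · by_cases h1 : c = 1
      · subst h1
        simp [increaseMultiplier_py_loop, List.takeWhile]
      · have h1' : (c != 1) = true := by simp [h1]
        simp [increaseMultiplier_py_loop, hc, h1, List.takeWhile, h1', ih]

-- if the first value is nonzero, prev stays 1 and no branch ever fires
theorem loop_one (l : List Int) (m : Int) :
    increaseMultiplier_py_loop l m 1 false = m := by
  induction l generalizing m with
  | nil => rfl
  | cons c rest ih => simp [increaseMultiplier_py_loop, ih]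

-- the prefix before the first 1 (B's index-and-slice) is exactly the takeWhile (≠ 1) prefix
theorem take_cut_eq_takeWhile (l : List Int) :
    l.take ((PySem.List.index? l 1).getD l.length) = l.takeWhile (fun x => x != 1) := by
  induction l with
  | nil => simp
  | cons c rest ih =>
    by_cases h1 : c = 1
    · subst h1
      rw [PySem.List.index?_cons_self]
      simp [List.takeWhile]
    · rw [PySem.List.index?_cons_of_ne rest h1]
      have h1' : (c != 1) = true := by simp [h1]
      rw [PySem.List.index?_eq_idxOf?] at ih
      simp [List.length_cons, List.takeWhile, h1', ih]

-- ===== VERDICT =====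
theorem increaseMultiplier_py_spec : Claim_equal_increaseMultiplier_py := by
  intro d _
  unfold Spec_increaseMultiplier_py increaseMultiplier_py increaseMultiplier_py_alt
  cases h : d.map Prod.snd with
  | nil => rfl
  | cons v rest =>
    by_cases hv : v = 0
    · subst hv
      have hslice : PySem.List.slice ((0:Int) :: rest) none
            (some (((PySem.List.index? ((0:Int) :: rest) 1).getD ((0:Int) :: rest).length : Nat) : Int))
          = ((0:Int) :: rest).takeWhile (fun x => x != 1) := by
        rw [PySem.List.slice_to_natCast, take_cut_eq_takeWhile]
      simp only [hslice]
      simp [increaseMultiplier_py_loop, loop_zero, List.takeWhile,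
        PySem.List.count, List.count_eq_countP]
      omega
    · simp [increaseMultiplier_py_loop, hv, loop_one]
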